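-- pv_equiv track=rewrite | github.com/Nanomace/Nyx | recruit.py | is_positive_readiness
-- ===== SOURCE A (Python) =====
-- POSITIVE_READINESS = {
--     "yes", "yeah", "yep", "yup", "y", "ready", "sure",
--     "ok", "okay", "absolutely", "lets go", "let's go", "start"
-- }
--
-- def is_positive_readiness(text: str) -> bool:
--     cleaned = text.strip().lower()
--     if cleaned in POSITIVE_READINESS:
--         return True
--     # handle small variations like "yes!" or "yeah!" etc.
--     for token in POSITIVE_READINESS:
--         if cleaned.startswith(token + " ") or cleaned.startswith(token + "!"):
--             return True
--     return False
-- ===== SOURCE B (Python) =====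
-- POSITIVE_READINESS = {
--     "yes", "yeah", "yep", "yup", "y", "ready", "sure",
--     "ok", "okay", "absolutely", "lets go", "let's go", "start"
-- }
--
-- def is_positive_readiness(text: str) -> bool:
--     # One left-to-right pass: grow a prefix and test it against the set
--     # whenever the next character is a separator (' ' or '!').
--     cleaned = text.strip().lower()
--     if cleaned in POSITIVE_READINESS:
--         return True
--     prefix = ""
--     for ch in cleaned:
--         if ch in " !" and prefix in POSITIVE_READINESS:
--             return True
--         prefix += ch
--     return False
-- ===== Notes on version B (the rewrite author's own statement) =====
-- stated objective: alternative
-- what changed: Instead of testing every token with startswith of token-plus-separator, B makes one left-to-right pass over the cleaned text, growing a prefix and testing it against the set whenever the next character is a space or an exclamation mark.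
import Mathlib
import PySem

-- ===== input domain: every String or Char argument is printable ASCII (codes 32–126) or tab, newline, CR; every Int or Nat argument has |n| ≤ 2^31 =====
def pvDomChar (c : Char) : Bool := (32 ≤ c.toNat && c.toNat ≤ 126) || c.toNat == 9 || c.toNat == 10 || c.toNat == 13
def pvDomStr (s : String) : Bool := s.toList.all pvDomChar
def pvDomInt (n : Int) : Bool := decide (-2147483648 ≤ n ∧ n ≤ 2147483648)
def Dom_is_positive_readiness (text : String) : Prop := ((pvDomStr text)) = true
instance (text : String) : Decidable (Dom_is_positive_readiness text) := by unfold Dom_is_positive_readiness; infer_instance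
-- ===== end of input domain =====

-- B replaces the per-token startswith scans by one left-to-right pass that grows a
-- prefix and tests it against the set at each separator character (objective: alternative).

-- the POSITIVE_READINESS set, as distinct char lists
def pvTokens : List (List Char) :=
  ["yes".toList, "yeah".toList, "yep".toList, "yup".toList, "y".toList, "ready".toList,
   "sure".toList, "ok".toList, "okay".toList, "absolutely".toList, "lets go".toList,
   "let's go".toList, "start".toList]

-- ===== PORT A =====
def is_positive_readiness (text : String) : Bool :=
  let cleaned := (PySem.Str.lower (PySem.Str.strip text)).toList
  if pvTokens.contains cleaned then true
  else pvTokens.any (fun token =>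
    PySem.Chars.startswith cleaned (token ++ [' ']) ||
    PySem.Chars.startswith cleaned (token ++ ['!']))

-- ===== PORT B =====
-- the for-loop of Source B: walk the characters, carrying the prefix read so far
def pvAltLoop (rest : List Char) (pre : List Char) : Bool :=
  match rest with
  | [] => false
  | c :: rest' =>
    if (c == ' ' || c == '!') && pvTokens.contains pre then true
    else pvAltLoop rest' (pre ++ [c])

def is_positive_readiness_alt (text : String) : Bool :=
  let cleaned := (PySem.Str.lower (PySem.Str.strip text)).toList
  if pvTokens.contains cleaned then true
  else pvAltLoop cleaned []

-- ===== PRECONDITION & SPEC =====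
def Spec_is_positive_readiness (text : String) (out : Bool) : Prop := out = is_positive_readiness_alt text
instance (text : String) (out : Bool) : Decidable (Spec_is_positive_readiness text out) := by unfold Spec_is_positive_readiness; infer_instance

-- ===== CLAIM (what is proved, stated in full; the proofs are below) =====
def Claim_equal_is_positive_readiness : Prop := ∀ (text : String), Dom_is_positive_readiness text → Spec_is_positive_readiness text (is_positive_readiness text)

-- ===== LEMMAS AND PROOFS =====

-- t ++ [c] is a prefix of l iff l starts with t and carries c right after it
lemma pv_prefix_char (t l : List Char) (c : Char) :
    (t ++ [c]) <+: l ↔ l.take t.length = t ∧ l[t.length]? = some c := by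
  constructor
  · rintro ⟨r, hr⟩
    subst hr
    refine ⟨?_, ?_⟩
    · rw [List.append_assoc]
      exact List.take_left
    · rw [List.append_assoc, List.getElem?_append_right (by simp)]
      simp
  · rintro ⟨ht, hc⟩
    have hlt : t.length < l.length := (List.getElem?_eq_some_iff.mp hc).1
    have : t ++ [c] = l.take (t.length + 1) := by
      rw [List.take_add_one, ht, hc]; rfl
    rw [this]
    exact List.take_prefix _ _

-- A's per-token scan, characterised by the separator positions of l
lemma pv_A_iff (l : List Char) :
    (pvTokens.any (fun token =>
      PySem.Chars.startswith l (token ++ [' ']) ||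
      PySem.Chars.startswith l (token ++ ['!']))) = true ↔
    ∃ i, ∃ _ : i < l.length, (l[i] = ' ' ∨ l[i] = '!') ∧ l.take i ∈ pvTokens := by
  simp only [List.any_eq_true, Bool.or_eq_true, PySem.Chars.startswith_iff, pv_prefix_char]
  constructor
  · rintro ⟨t, ht, h | h⟩ <;>
    · obtain ⟨htake, hget⟩ := h
      have hlt : t.length < l.length := (List.getElem?_eq_some_iff.mp hget).1
      have hval := (List.getElem?_eq_some_iff.mp hget).2
      exact ⟨t.length, hlt, by simp [hval], by rw [htake]; exact ht⟩
  · rintro ⟨i, hlt, hc, hmem⟩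
    refine ⟨l.take i, hmem, ?_⟩
    have hlen : (l.take i).length = i := by simp [Nat.le_of_lt hlt]
    rcases hc with hc | hc
    · exact Or.inl ⟨by rw [hlen], by rw [hlen, List.getElem?_eq_getElem hlt, hc]⟩
    · exact Or.inr ⟨by rw [hlen], by rw [hlen, List.getElem?_eq_getElem hlt, hc]⟩

-- B's loop, characterised the same way (invariant: pre is the part already read)
lemma pv_loop_iff (rest : List Char) : ∀ pre : List Char,
    pvAltLoop rest pre = true ↔
    ∃ i, ∃ _ : i < rest.length, (rest[i] = ' ' ∨ rest[i] = '!') ∧ pre ++ rest.take i ∈ pvTokens := by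
  induction rest with
  | nil => intro pre; simp [pvAltLoop]
  | cons c rest' ih =>
    intro pre
    rw [pvAltLoop]
    by_cases h : ((c == ' ' || c == '!') && pvTokens.contains pre) = true
    · rw [if_pos h]
      have h' : (c = ' ' ∨ c = '!') ∧ pre ∈ pvTokens := by simpa using h
      simp only [true_iff]
      exact ⟨0, by simp, by simpa using h'.1, by simpa using h'.2⟩
    · rw [if_neg h, ih]
      constructor
      · rintro ⟨i, hlt, hc, hmem⟩
        exact ⟨i + 1, by simpa using hlt, by simpa using hc, by simpa using hmem⟩
      · rintro ⟨i, hlt, hc, hmem⟩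
        match i with
        | 0 =>
          exfalso
          apply h
          simp only [List.getElem_cons_zero] at hc
          simp only [List.take_zero, List.append_nil] at hmem
          rcases hc with hc | hc <;> simp [hc, hmem]
        | Nat.succ i =>
          exact ⟨i, by simpa using hlt, by simpa using hc, by simpa using hmem⟩

-- ===== VERDICT (by name: the statement is the Claim_ definition above) =====
theorem is_positive_readiness_spec : Claim_equal_is_positive_readiness := by
  intro text _
  unfold Spec_is_positive_readiness is_positive_readiness is_positive_readiness_alt
  set l := (PySem.Str.lower (PySem.Str.strip text)).toList with hl
  cases hmem : pvTokens.contains l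
  · rw [if_neg (by simpa using hmem), if_neg (by simpa using hmem)]
    rw [Bool.eq_iff_iff, pv_A_iff, pv_loop_iff l []]
    simp
  · rw [if_pos hmem, if_pos hmem]
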